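-- pv_equiv track=rewrite | github.com/vladvintilescu01/Car-Troubleshooting-System | car_troubleshooting_system/inference_engine.py | forward_chain
-- ===== SOURCE A (Python) =====
-- def parse_condition(condition_str):
--     """Parse a condition string and return set of required symptoms"""
--     # Split by AND to get individual conditions
--     parts = [part.strip() for part in condition_str.split("AND")]
--     return set(parts)
--
-- def forward_chain(symptom, rules, visited=None, facts=None):
--     """Return full chain of causes for a symptom, avoiding duplicates"""
--     if visited is None:
--         visited = set()
--     if facts is None:
--         facts = set()
--
--     chains = []
--     for condition, result in rules:
--         # Parse the condition to handle AND logic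
--         required_symptoms = parse_condition(condition)
--
--         # Only proceed if the condition has exactly one symptom and it matches
--         if len(required_symptoms) == 1 and list(required_symptoms)[0].lower() == symptom.lower():
--             if result.lower() not in visited:
--                 visited.add(result.lower())
--                 sub_chains = forward_chain(result, rules, visited.copy(), facts)
--                 if sub_chains:
--                     for sub in sub_chains:
--                         chains.append(f"{result} -> {sub}")
--                 else:
--                     chains.append(result)
--     return chains
-- ===== SOURCE B (Python) =====
-- def forward_chain(symptom, rules, visited=None, facts=None):
--     """Return full chain of causes for a symptom, avoiding duplicates.
--
--     Builds a symptom->results index once, DFS collects chains as node-name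
--     lists, and the strings are produced by a single join at the end.
--     """
--     if visited is None:
--         visited = set()
--     if facts is None:
--         facts = set()
--     index = {}
--     for condition, result in rules:
--         parts = {p.strip() for p in condition.split("AND")}
--         if len(parts) == 1:
--             index.setdefault(next(iter(parts)).lower(), []).append(result)
--
--     def dfs(sym, vis):
--         paths = []
--         for result in index.get(sym.lower(), []):
--             rl = result.lower()
--             if rl not in vis:
--                 vis.add(rl)
--                 sub = dfs(result, set(vis))
--                 if sub:
--                     paths.extend([result] + p for p in sub)
--                 else:
--                     paths.append([result])
--         return paths
--
--     return [" -> ".join(p) for p in dfs(symptom, visited)]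
-- ===== Notes on version B (the rewrite author's own statement) =====
-- stated objective: faster
-- what changed: B builds a lowered-symptom -> results index once instead of rescanning and re-parsing all rules at every DFS node, and the DFS collects chains as lists of node names that are turned into strings by one final ' -> '.join pass instead of re-prefixing strings at every level.
import Mathlib
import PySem

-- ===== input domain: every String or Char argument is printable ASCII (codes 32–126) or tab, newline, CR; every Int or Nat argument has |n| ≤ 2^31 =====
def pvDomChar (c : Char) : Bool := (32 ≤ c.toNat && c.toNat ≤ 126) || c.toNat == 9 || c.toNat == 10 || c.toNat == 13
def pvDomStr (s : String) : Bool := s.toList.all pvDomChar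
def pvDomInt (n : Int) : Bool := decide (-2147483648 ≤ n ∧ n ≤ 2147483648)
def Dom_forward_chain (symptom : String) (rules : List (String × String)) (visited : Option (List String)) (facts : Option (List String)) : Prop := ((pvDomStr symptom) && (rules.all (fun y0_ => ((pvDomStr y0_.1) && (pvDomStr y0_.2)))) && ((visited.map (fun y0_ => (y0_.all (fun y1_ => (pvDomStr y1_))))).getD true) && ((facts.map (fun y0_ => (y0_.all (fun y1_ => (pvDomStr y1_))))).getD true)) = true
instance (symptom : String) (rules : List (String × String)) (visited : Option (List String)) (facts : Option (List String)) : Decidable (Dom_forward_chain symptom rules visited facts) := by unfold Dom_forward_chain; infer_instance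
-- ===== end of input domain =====

-- B replaces A's per-node rescan-and-reparse of all rules by a symptom->results index built once, collects chains as node-name lists and joins them once at the end (asymptotically faster; return-value equivalence — both Pythons mutate the passed-in `visited` set the same way).


-- ===== PORT A =====
-- parse_condition: set of stripped parts of condition.split("AND")
def pvParseCondition (c : String) : PySem.Set String :=
  -- split? is always `some` here: the separator "AND" is non-empty
  PySem.Set.ofList (((PySem.Str.split? c "AND").getD []).map PySem.Str.strip)

-- A's recursive loop over rules; the Nat argument is a totality guard only
-- (recursion depth is bounded by the number of rules, so fuel rules.length+1 is never exhausted).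
def forward_chain_go (rules : List (String × String)) : Nat → String → PySem.Set String → List String
  | 0, _, _ => []
  | fuel+1, symptom, visited0 =>
    (rules.foldl (fun (st : PySem.Set String × List String) cr =>
      match pvParseCondition cr.1 with
      | [s0] =>
        if PySem.Str.lower s0 = PySem.Str.lower symptom then
          let rl := PySem.Str.lower cr.2
          if PySem.Set.contains st.1 rl then st
          else
            let visited' := PySem.Set.add st.1 rl
            let sub := forward_chain_go rules fuel cr.2 visited'
            (visited', st.2 ++ if !sub.isEmpty then sub.map (fun s => cr.2 ++ " -> " ++ s) else [cr.2])
        else st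
      | _ => st) (visited0, [])).2

def forward_chain (symptom : String) (rules : List (String × String)) (visited : Option (List String)) (_facts : Option (List String)) : List String :=
  -- visited/facts: Python sets (None -> empty); facts is never used by A.  Equivalence is about the return value.
  let vis : PySem.Set String := PySem.Set.ofList (visited.getD [])
  forward_chain_go rules (rules.length + 1) symptom vis

-- ===== PORT B =====
-- B: build the symptom -> results index once (setdefault/append = Dict.modify with default []).
def pvIndex (rules : List (String × String)) : PySem.Dict String (List String) :=
  rules.foldl (fun d cr =>
    match pvParseCondition cr.1 with
    | [s0] => d.modify (PySem.Str.lower s0) [] (· ++ [cr.2])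
    | _ => d) PySem.Dict.empty

-- B's dfs over index lookups, returning chains as LISTS of node names
-- (Python's for-loop over the looked-up results is the structural recursion fcLoop);
-- same totality guard as A's port.
mutual
def fcDfs (idx : PySem.Dict String (List String)) (fuel : Nat) (sym : String) (vis : PySem.Set String) : List (List String) :=
  match fuel with
  | 0 => []
  | fuel+1 => fcLoop idx fuel (idx.getD (PySem.Str.lower sym) []) vis
termination_by (fuel, 0)

def fcLoop (idx : PySem.Dict String (List String)) (fuel : Nat) (results : List String) (vis : PySem.Set String) : List (List String) :=
  match results with
  | [] => []
  | result :: rest =>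
    let rl := PySem.Str.lower result
    if PySem.Set.contains vis rl then fcLoop idx fuel rest vis
    else
      let vis' := PySem.Set.add vis rl
      let sub := fcDfs idx fuel result vis'
      (if sub.isEmpty then [[result]] else sub.map (fun p => result :: p)) ++ fcLoop idx fuel rest vis'
termination_by (fuel, results.length + 1)
end


def forward_chain_alt (symptom : String) (rules : List (String × String)) (visited : Option (List String)) (_facts : Option (List String)) : List String :=
  let vis : PySem.Set String := PySem.Set.ofList (visited.getD [])
  (fcDfs (pvIndex rules) (rules.length + 1) symptom vis).map (PySem.Str.join " -> ")

-- ===== PRECONDITION & SPEC =====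
def Spec_forward_chain (symptom : String) (rules : List (String × String)) (visited : Option (List String)) (facts : Option (List String)) (out : List String) : Prop := out = forward_chain_alt symptom rules visited facts
instance (symptom : String) (rules : List (String × String)) (visited : Option (List String)) (facts : Option (List String)) (out : List String) : Decidable (Spec_forward_chain symptom rules visited facts out) := by unfold Spec_forward_chain; infer_instance

-- ===== CLAIM (what is proved, stated in full; the proofs are below) =====
def Claim_equal_forward_chain : Prop := ∀ (symptom : String) (rules : List (String × String)) (visited : Option (List String)) (facts : Option (List String)), Dom_forward_chain symptom rules visited facts → Spec_forward_chain symptom rules visited facts (forward_chain symptom rules visited facts)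

-- ===== LEMMAS AND PROOFS =====
-- results of single-symptom rules whose (stripped, lowered) symptom is k, in rule order
def pvMatches (k : String) (rules : List (String × String)) : List String :=
  rules.filterMap (fun cr =>
    match pvParseCondition cr.1 with
    | [s0] => if PySem.Str.lower s0 = k then some cr.2 else none
    | _ => none)

theorem pvIndex_getD_gen (rules : List (String × String)) (d : PySem.Dict String (List String)) (k : String) :
    (rules.foldl (fun d cr =>
      match pvParseCondition cr.1 with
      | [s0] => d.modify (PySem.Str.lower s0) [] (· ++ [cr.2])
      | _ => d) d).getD k []
    = d.getD k [] ++ pvMatches k rules := by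
  induction rules generalizing d with
  | nil => simp [pvMatches]
  | cons cr tl ih =>
    cases hp : pvParseCondition cr.1 with
    | nil =>
      simp only [List.foldl_cons, hp]
      simpa [pvMatches, hp] using ih d
    | cons s0 rest =>
      cases rest with
      | nil =>
        simp only [List.foldl_cons, hp]
        rw [ih]
        rw [PySem.Dict.getD_modify]
        simp only [pvMatches, List.filterMap_cons, hp]
        by_cases hk : PySem.Str.lower s0 = k
        · simp [hk]
        · simp [hk, Ne.symm hk]
      | cons s1 r2 =>
        simp only [List.foldl_cons, hp]
        rw [ih]
        simp [pvMatches, hp]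

theorem pvIndex_getD (rules : List (String × String)) (k : String) :
    (pvIndex rules).getD k [] = pvMatches k rules := by
  unfold pvIndex
  simpa using pvIndex_getD_gen rules PySem.Dict.empty k

theorem pv_fold_filter (k : String) (g : PySem.Set String × List String → String → PySem.Set String × List String)
    (rules : List (String × String)) (st : PySem.Set String × List String) :
    rules.foldl (fun st cr =>
      match pvParseCondition cr.1 with
      | [s0] => if PySem.Str.lower s0 = k then g st cr.2 else st
      | _ => st) st
    = (pvMatches k rules).foldl g st := by
  induction rules generalizing st with
  | nil => rfl
  | cons cr tl ih =>
    cases hp : pvParseCondition cr.1 with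
    | nil => simp only [List.foldl_cons, hp, pvMatches, List.filterMap_cons]
             simpa [hp, pvMatches] using ih st
    | cons s0 rest =>
      cases rest with
      | nil =>
        simp only [List.foldl_cons, hp, pvMatches, List.filterMap_cons]
        by_cases hk : PySem.Str.lower s0 = k
        · simpa [hp, hk, pvMatches] using ih (g st cr.2)
        · simpa [hp, hk, pvMatches] using ih st
      | cons s1 r2 =>
        simp only [List.foldl_cons, hp, pvMatches, List.filterMap_cons]
        simpa [hp, pvMatches] using ih st

-- " -> ".join on strings
theorem pv_join_singleton (sep x : String) : PySem.Str.join sep [x] = x := by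
  simp [PySem.Str.join]

theorem pv_join_cons_cons (sep x y : String) (t : List String) :
    PySem.Str.join sep (x :: y :: t) = x ++ sep ++ PySem.Str.join sep (y :: t) := by
  simp [PySem.Str.join, PySem.Chars.join_cons_cons, String.append_assoc]

-- every chain fcLoop produces is a nonempty list of node names
theorem fcLoop_ne_nil (idx : PySem.Dict String (List String)) (fuel : Nat)
    (results : List String) (vis : PySem.Set String) (p : List String)
    (hp : p ∈ fcLoop idx fuel results vis) : p ≠ [] := by
  induction results generalizing vis with
  | nil => simp [fcLoop] at hp
  | cons result rest ih =>
    rw [fcLoop] at hp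
    by_cases hc : PySem.Set.contains vis (PySem.Str.lower result) = true
    · simp only [hc, if_true] at hp
      exact ih _ hp
    · simp only [hc, if_false, Bool.false_eq_true, List.mem_append] at hp
      rcases hp with hp | hp
      · split at hp
        · simp at hp; simp [hp]
        · obtain ⟨q, _, hq⟩ := List.mem_map.mp hp
          simp [← hq]
      · exact ih _ hp

theorem fcDfs_ne_nil (idx : PySem.Dict String (List String)) (fuel : Nat)
    (sym : String) (vis : PySem.Set String) (p : List String)
    (hp : p ∈ fcDfs idx fuel sym vis) : p ≠ [] := by
  cases fuel with
  | zero => simp [fcDfs] at hp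
  | succ fuel => exact fcLoop_ne_nil idx fuel _ vis p (by rwa [fcDfs] at hp)

theorem pv_go_eq_dfs (rules : List (String × String)) (fuel : Nat) (sym : String) (vis : PySem.Set String) :
    forward_chain_go rules fuel sym vis
      = (fcDfs (pvIndex rules) fuel sym vis).map (PySem.Str.join " -> ") := by
  induction fuel generalizing sym vis with
  | zero => simp [forward_chain_go, fcDfs]
  | succ fuel ih =>
    rw [forward_chain_go, fcDfs,
        pv_fold_filter (PySem.Str.lower sym)
          (fun st result =>
            let rl := PySem.Str.lower result
            if PySem.Set.contains st.1 rl then st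
            else
              let vis' := PySem.Set.add st.1 rl
              let sub := forward_chain_go rules fuel result vis'
              (vis', st.2 ++ if !sub.isEmpty then sub.map (fun s => result ++ " -> " ++ s) else [result])),
        ← pvIndex_getD]
    generalize (pvIndex rules).getD (PySem.Str.lower sym) [] = lst
    -- fold over the matched results = acc ++ joined fcLoop chains
    suffices h : ∀ (lst : List String) (vis : PySem.Set String) (acc : List String),
        (lst.foldl (fun st result =>
            if PySem.Set.contains st.1 (PySem.Str.lower result) then st
            else
              let vis' := PySem.Set.add st.1 (PySem.Str.lower result)
              let sub := forward_chain_go rules fuel result vis'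
              (vis', st.2 ++ if !sub.isEmpty then sub.map (fun s => result ++ " -> " ++ s) else [result]))
          (vis, acc)).2
        = acc ++ (fcLoop (pvIndex rules) fuel lst vis).map (PySem.Str.join " -> ") by
      simpa using h lst vis []
    intro lst
    induction lst with
    | nil => intro vis acc; simp [fcLoop]
    | cons result rest ihl =>
      intro vis acc
      rw [List.foldl_cons, fcLoop]
      by_cases hc : PySem.Set.contains vis (PySem.Str.lower result) = true
      · simp only [hc, if_true]
        exact ihl vis acc
      · simp only [hc, if_false, Bool.false_eq_true]
        rw [ihl, List.map_append, ← List.append_assoc]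
        congr 2
        rw [ih]
        rcases hsub : fcDfs (pvIndex rules) fuel result (PySem.Set.add vis (PySem.Str.lower result)) with _ | ⟨q, qs⟩
        · simp [pv_join_singleton]
        · have hjoin : ∀ p ∈ q :: qs, result ++ " -> " ++ PySem.Str.join " -> " p
              = PySem.Str.join " -> " (result :: p) := by
            intro p hp
            have hpne : p ≠ [] :=
              fcDfs_ne_nil _ fuel result _ p (by rw [hsub]; exact hp)
            rcases p with _ | ⟨z, zs⟩
            · exact absurd rfl hpne
            · rw [pv_join_cons_cons]
          simp only [List.isEmpty_cons, List.map_cons, Bool.not_false, if_true, List.map_map]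
          refine List.ext_getElem (by simp) ?_
          intro i h1 h2
          rcases i with _ | i
          · have hq := hjoin q (by simp)
            simp [hq]
          · have hi : i < qs.length := by simpa using h1
            have hqi := hjoin qs[i] (List.mem_cons_of_mem _ (List.getElem_mem hi))
            simp [Function.comp, hqi]

-- ===== VERDICT (by name: the statement is the Claim_ definition above) =====
theorem forward_chain_spec : Claim_equal_forward_chain := by
  intro symptom rules visited facts _
  unfold Spec_forward_chain forward_chain forward_chain_alt
  exact pv_go_eq_dfs rules (rules.length + 1) symptom _
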